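-- pv_equiv track=rewrite | github.com/milosivanovic/xbot | xbot/modules/fun.py | ghetto
-- ===== SOURCE A (Python) =====
-- def ghetto(bot, args):
-- 	if len(args) == 2:
-- 		real_name = args[1].lower()
-- 		ghetto_name = ""
--
-- 		table = {
-- 					'a': 'sha', 'b': 'ni', 'c': 'ki', 'd': 'que',
-- 					'e': 'nay', 'f': 'qui', 'g': 'ti', 'h': 'la',
-- 					'i': 'kay', 'j': 'ri', 'k': 'barack', 'l': 'obama',
-- 					'm': 'di', 'n': 'ta', 'o': 'ee', 'p': 'ray',
-- 					'q': 'cli', 'r': 'gurl', 's': 'na', 't': 'qua',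
-- 					'u': 'kwa', 'v': 'ise', 'w': 'fi', 'x': 'quee',
-- 					'y': 'mi', 'z': 'si'
-- 		}
--
-- 		for letter in real_name:
-- 			try: ghetto_name += table[letter] + "-"
-- 			except KeyError: return "Invalid name."
--
-- 		return ghetto_name[:-1]
--
-- 	return "Usage: !%s <first name>" % args[0]
-- ===== SOURCE B (Python) =====
-- def ghetto(bot, args):
-- 	if len(args) != 2:
-- 		return "Usage: !%s <first name>" % args[0]
--
-- 	table = {
-- 				'a': 'sha', 'b': 'ni', 'c': 'ki', 'd': 'que',
-- 				'e': 'nay', 'f': 'qui', 'g': 'ti', 'h': 'la',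
-- 				'i': 'kay', 'j': 'ri', 'k': 'barack', 'l': 'obama',
-- 				'm': 'di', 'n': 'ta', 'o': 'ee', 'p': 'ray',
-- 				'q': 'cli', 'r': 'gurl', 's': 'na', 't': 'qua',
-- 				'u': 'kwa', 'v': 'ise', 'w': 'fi', 'x': 'quee',
-- 				'y': 'mi', 'z': 'si'
-- 	}
--
-- 	name = args[1].lower()
-- 	if all(c in table for c in name):
-- 		return "-".join(table[c] for c in name)
-- 	return "Invalid name."
-- ===== Notes on version B (the rewrite author's own statement) =====
-- stated objective: simpler
-- what changed: Replaces the single accumulate-with-early-exit loop (building 'syl-' pieces and stripping the trailing dash with [:-1]) by a validation pass (all letters are table keys) followed by a '-'.join build pass; Pre_ excludes empty args, where A raises IndexError on args[0].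
import Mathlib
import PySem

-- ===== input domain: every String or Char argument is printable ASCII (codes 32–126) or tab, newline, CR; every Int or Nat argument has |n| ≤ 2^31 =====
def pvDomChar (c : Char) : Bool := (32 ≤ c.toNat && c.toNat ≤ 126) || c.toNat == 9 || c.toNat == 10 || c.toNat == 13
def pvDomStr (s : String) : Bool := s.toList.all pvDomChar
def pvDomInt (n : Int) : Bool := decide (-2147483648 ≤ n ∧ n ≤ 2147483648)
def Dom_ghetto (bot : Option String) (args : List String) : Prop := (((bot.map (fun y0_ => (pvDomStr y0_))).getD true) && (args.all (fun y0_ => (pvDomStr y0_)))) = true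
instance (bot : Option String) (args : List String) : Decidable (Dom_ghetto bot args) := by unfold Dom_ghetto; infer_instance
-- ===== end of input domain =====

-- B replaces A's accumulate-with-early-exit loop (trailing dash stripped with [:-1])
-- by a validation pass over the letters followed by a '-'.join build pass (objective: simpler).

-- ===== PORT A =====
-- shared data: the syllable table (a literal dict in both Pythons)
def ghettoTable : PySem.Dict Char String :=
  PySem.Dict.ofList [('a', "sha"), ('b', "ni"), ('c', "ki"), ('d', "que"),
                     ('e', "nay"), ('f', "qui"), ('g', "ti"), ('h', "la"),
                     ('i', "kay"), ('j', "ri"), ('k', "barack"), ('l', "obama"),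
                     ('m', "di"), ('n', "ta"), ('o', "ee"), ('p', "ray"),
                     ('q', "cli"), ('r', "gurl"), ('s', "na"), ('t', "qua"),
                     ('u', "kwa"), ('v', "ise"), ('w', "fi"), ('x', "quee"),
                     ('y', "mi"), ('z', "si")]

-- A's loop: accumulate 'syllable-' pieces, early-return on a missing key (KeyError)
def ghettoLoopA : List Char → List Char → String
  | [], acc => String.ofList (PySem.List.slice acc none (some (-1)))      -- ghetto_name[:-1]
  | c :: rest, acc =>
    match PySem.Dict.get? ghettoTable c with
    | some syl => ghettoLoopA rest (acc ++ (syl.toList ++ ['-']))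
    | none => "Invalid name."

def ghetto (bot : Option String) (args : List String) : String :=
  if args.length = 2 then
    ghettoLoopA (PySem.Chars.lower ((PySem.List.pyGet? args 1).getD "").toList) []
  else
    String.ofList ("Usage: !".toList ++ ((PySem.List.pyGet? args 0).getD "").toList ++ " <first name>".toList)

-- ===== PORT B =====
def ghetto_alt (bot : Option String) (args : List String) : String :=
  if args.length = 2 then
    let name := PySem.Chars.lower ((PySem.List.pyGet? args 1).getD "").toList
    if name.all (fun c => (PySem.Dict.get? ghettoTable c).isSome) then
      String.ofList (PySem.Chars.join ['-'] (name.map (fun c => ((PySem.Dict.get? ghettoTable c).getD "").toList)))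
    else
      "Invalid name."
  else
    String.ofList ("Usage: !".toList ++ ((PySem.List.pyGet? args 0).getD "").toList ++ " <first name>".toList)

-- ===== PRECONDITION & SPEC =====
-- Pre_ excludes only empty args, where the Python A raises IndexError on args[0].
def Pre_ghetto (bot : Option String) (args : List String) : Prop := args ≠ []
instance (bot : Option String) (args : List String) : Decidable (Pre_ghetto bot args) := by unfold Pre_ghetto; infer_instance
def pvWitness_ghetto : Option String × List String := (none, ["!ghetto", "Bob"])

def Spec_ghetto (bot : Option String) (args : List String) (out : String) : Prop := out = ghetto_alt bot args
instance (bot : Option String) (args : List String) (out : String) : Decidable (Spec_ghetto bot args out) := by unfold Spec_ghetto; infer_instance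

-- ===== CLAIM (what is proved, stated in full; the proofs are below) =====
def Claim_equal_ghetto : Prop := ∀ (bot : Option String) (args : List String), Dom_ghetto bot args → Pre_ghetto bot args → Spec_ghetto bot args (ghetto bot args)

-- ===== LEMMAS AND PROOFS =====

-- A's loop, characterised: validity test then dash-joined pieces (with trailing dash, dropped at the end)
lemma ghettoLoopA_spec (cs acc : List Char) :
    ghettoLoopA cs acc =
      if cs.all (fun c => (PySem.Dict.get? ghettoTable c).isSome) then
        String.ofList (PySem.List.slice
          (acc ++ (cs.map (fun c => ((PySem.Dict.get? ghettoTable c).getD "").toList ++ ['-'])).flatten)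
          none (some (-1)))
      else "Invalid name." := by
  induction cs generalizing acc with
  | nil => simp [ghettoLoopA]
  | cons c rest ih =>
    simp only [ghettoLoopA, List.all_cons, List.map_cons, List.flatten_cons]
    cases h : PySem.Dict.get? ghettoTable c with
    | none => simp
    | some syl => simp [ih, List.append_assoc]

-- dropping the trailing dash of the concatenated 'piece-' blocks is joining with '-'
lemma flatten_dash_dropLast (f : Char → List Char) (cs : List Char) :
    ((cs.map (fun c => f c ++ ['-'])).flatten).dropLast = PySem.Chars.join ['-'] (cs.map f) := by
  induction cs with
  | nil => simp [PySem.Chars.join_nil]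
  | cons c rest ih =>
    cases rest with
    | nil => simp [PySem.Chars.join_singleton]
    | cons c2 rest2 =>
      rw [List.map_cons, List.flatten_cons, List.dropLast_append_of_ne_nil (by simp),
          ih]
      simp [PySem.Chars.join_cons_cons, List.append_assoc]

-- ===== VERDICT (by name: the statement is the Claim_ definition above) =====
theorem ghetto_spec : Claim_equal_ghetto := by
  intro bot args _ _
  unfold Spec_ghetto ghetto ghetto_alt
  by_cases h2 : args.length = 2
  · simp only [h2, ghettoLoopA_spec, List.nil_append,
      PySem.List.slice_to_neg_one, flatten_dash_dropLast]
  · simp [h2]
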